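-- pv_equiv track=rewrite | github.com/spencer-gass/Analysis-of-Audio-Classification-Models | python/dataLoader2.py | _getOrderedPaths
-- ===== SOURCE A (Python) =====
-- def _getOrderedPaths(paths, labels):
--     op = dict()
--     for i in range(len(paths)):
--         label = labels[i]
--         path = paths[i]
--         if label not in op:
--             op[label] = [path]
--         else:
--             op[label].append(path)
--     return op
-- ===== SOURCE B (Python) =====
-- def _getOrderedPaths(paths, labels):
--     n = len(paths)
--     order = []
--     for i in range(n):
--         label = labels[i]
--         if label not in order:
--             order.append(label)
--     return {label: [paths[j] for j in range(n) if labels[j] == label]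
--             for label in order}
-- ===== Notes on version B (the rewrite author's own statement) =====
-- stated objective: alternative
-- what changed: A buckets in a single pass into a dict keyed by label; B first collects the distinct labels in first-appearance order and then builds each bucket by one filtering scan over all indices per distinct label, with no dict at all.
import Mathlib
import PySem

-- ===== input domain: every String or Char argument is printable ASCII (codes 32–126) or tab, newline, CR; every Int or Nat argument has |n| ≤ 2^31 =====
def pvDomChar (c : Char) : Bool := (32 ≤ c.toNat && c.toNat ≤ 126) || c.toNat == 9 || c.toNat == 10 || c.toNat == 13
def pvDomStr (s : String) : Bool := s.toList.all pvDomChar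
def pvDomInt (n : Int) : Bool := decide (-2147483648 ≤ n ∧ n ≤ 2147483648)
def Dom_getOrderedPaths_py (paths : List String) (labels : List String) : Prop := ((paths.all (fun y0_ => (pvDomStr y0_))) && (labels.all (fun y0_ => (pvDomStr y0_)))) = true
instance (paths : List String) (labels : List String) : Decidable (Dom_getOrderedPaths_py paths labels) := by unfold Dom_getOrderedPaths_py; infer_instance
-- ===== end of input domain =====

-- B replaces A's single dict-bucketing pass by first-appearance label collection
-- followed by one filtering scan over the indices per distinct label (alternative decomposition, no dict).

-- ===== PORT A =====
def getOrderedPaths_py (paths : List String) (labels : List String) : List (String × List String) :=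
  ((List.range paths.length).foldl
    (fun (op : PySem.Dict String (List String)) (i : Nat) =>
      let label := (PySem.List.pyGet? labels (i : Int)).getD ""
      let path  := (PySem.List.pyGet? paths (i : Int)).getD ""
      if !op.contains label then
        op.insert label [path]
      else
        op.insert label (op.getD label [] ++ [path]))
    PySem.Dict.empty).items

-- ===== PORT B =====
def getOrderedPaths_py_alt (paths : List String) (labels : List String) : List (String × List String) :=
  let n := paths.length
  let order := (List.range n).foldl
    (fun (acc : List String) (i : Nat) =>
      let label := (PySem.List.pyGet? labels (i : Int)).getD ""
      if label ∈ acc then acc else acc ++ [label]) []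
  order.map (fun label =>
    (label,
      ((List.range n).filter
        (fun (j : Nat) => ((PySem.List.pyGet? labels (j : Int)).getD "") == label)).map
        (fun (j : Nat) => ((PySem.List.pyGet? paths (j : Int)).getD ""))))

-- ===== PRECONDITION & SPEC =====
-- A raises IndexError (labels[i]) when labels is shorter than paths; B indexes the same way and raises there too.
def Pre_getOrderedPaths_py (paths : List String) (labels : List String) : Prop :=
  paths.length ≤ labels.length
instance (paths : List String) (labels : List String) : Decidable (Pre_getOrderedPaths_py paths labels) := by unfold Pre_getOrderedPaths_py; infer_instance
def pvWitness_getOrderedPaths_py : List String × List String := (["p0", "p1", "p2"], ["a", "b", "a"])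

def Spec_getOrderedPaths_py (paths : List String) (labels : List String) (out : List (String × List String)) : Prop := out = getOrderedPaths_py_alt paths labels
instance (paths : List String) (labels : List String) (out : List (String × List String)) : Decidable (Spec_getOrderedPaths_py paths labels out) := by unfold Spec_getOrderedPaths_py; infer_instance

-- ===== CLAIM (what is proved, stated in full; the proofs are below) =====
def Claim_equal_getOrderedPaths_py : Prop := ∀ (paths : List String) (labels : List String), Dom_getOrderedPaths_py paths labels → Pre_getOrderedPaths_py paths labels → Spec_getOrderedPaths_py paths labels (getOrderedPaths_py paths labels)

-- ===== LEMMAS AND PROOFS =====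

-- A's per-element dict step, on a (label, path) pair
def gStep (d : PySem.Dict String (List String)) (x : String × String) : PySem.Dict String (List String) :=
  if !d.contains x.1 then d.insert x.1 [x.2]
  else d.insert x.1 (d.getD x.1 [] ++ [x.2])

-- B's order-collection step
def gOrd (acc : List String) (l : String) : List String :=
  if l ∈ acc then acc else acc ++ [l]

-- B's bucket for label k, on a list of (label, path) pairs
def gVals (zs : List (String × String)) (k : String) : List String :=
  (zs.filter (fun q => q.1 == k)).map Prod.snd

-- B's whole result, on a list of (label, path) pairs
def gGroup (zs : List (String × String)) : List (String × List String) :=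
  ((zs.map Prod.fst).foldl gOrd []).map (fun l => (l, gVals zs l))

theorem mem_foldl_gOrd (ls : List String) (acc : List String) (l : String) :
    l ∈ ls.foldl gOrd acc ↔ l ∈ acc ∨ l ∈ ls := by
  induction ls generalizing acc with
  | nil => simp
  | cons a t ih =>
    simp only [List.foldl_cons, ih, gOrd]
    split_ifs with h
    · constructor
      · rintro (h1 | h2)
        · exact Or.inl h1
        · exact Or.inr (List.mem_cons_of_mem _ h2)
      · rintro (h1 | h2)
        · exact Or.inl h1
        · rcases List.mem_cons.mp h2 with rfl | h3
          · exact Or.inl h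
          · exact Or.inr h3
    · simp only [List.mem_append, List.mem_cons]
      tauto

theorem find?_map_pair {α : Type} (os : List String) (g : String → α) (l : String)
    (h : l ∈ os) :
    List.find? (fun p => p.1 == l) (os.map (fun k => (k, g k))) = some (l, g l) := by
  induction os with
  | nil => simp at h
  | cons a t ih =>
    by_cases hal : a = l
    · subst hal; simp
    · rcases List.mem_cons.mp h with rfl | ht
      · exact absurd rfl hal
      · rw [List.map_cons, List.find?_cons_of_neg (by simp [hal])]
        exact ih ht

theorem any_map_pair {α : Type} (os : List String) (g : String → α) (l : String) :
    (os.map (fun k => (k, g k))).any (fun p => p.1 == l) = decide (l ∈ os) := by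
  induction os with
  | nil => simp
  | cons a t ih =>
    simp only [List.map_cons, List.any_cons, ih, List.mem_cons]
    by_cases h : a = l
    · subst h; simp
    · simp [h, Ne.symm h]

theorem foldl_gStep_items (zs : List (String × String)) :
    (zs.foldl gStep PySem.Dict.empty).items = gGroup zs := by
  induction zs using List.reverseRecOn with
  | nil => simp [gGroup, PySem.Dict.empty]
  | append_singleton zs x ih =>
    obtain ⟨l, p⟩ := x
    rw [List.foldl_append, List.foldl_cons, List.foldl_nil]
    set D := zs.foldl gStep PySem.Dict.empty with hD
    set os := ((zs.map Prod.fst).foldl gOrd []) with hos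
    have hitems : D.items = os.map (fun k => (k, gVals zs k)) := ih
    have hDmk : D = PySem.Dict.mk (os.map (fun k => (k, gVals zs k))) := by
      rw [← hitems]
    -- order of the extended list
    have horder : ((zs ++ [(l, p)]).map Prod.fst).foldl gOrd [] = gOrd os l := by
      rw [List.map_append, List.foldl_append]; rfl
    -- buckets of the extended list
    have hfilter : ∀ k, gVals (zs ++ [(l, p)]) k
        = gVals zs k ++ (if l = k then [p] else []) := by
      intro k
      unfold gVals
      rw [List.filter_append, List.map_append]
      congr 1
      by_cases hlk : l = k
      · subst hlk; simp
      · simp [hlk]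
    have hcontains : D.contains l = decide (l ∈ os) := by
      rw [hDmk]; exact any_map_pair os (gVals zs) l
    by_cases hmem : l ∈ os
    · -- existing label : in-place bucket update
      have hget : D.get? l = some (gVals zs l) := by
        rw [hDmk]
        simp only [PySem.Dict.get?]
        rw [find?_map_pair os (gVals zs) l hmem]
        rfl
      have hgetD : D.getD l [] = gVals zs l := by
        simp [PySem.Dict.getD, hget]
      have hcon : D.contains l = true := by rw [hcontains]; simpa using hmem
      rw [gStep]
      simp only [hcon, Bool.not_true, Bool.false_eq_true, if_false]
      rw [hgetD]
      simp only [PySem.Dict.insert, hcon, if_true]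
      rw [hitems, List.map_map]
      unfold gGroup
      rw [horder]
      have hordl : gOrd os l = os := by simp [gOrd, hmem]
      rw [hordl]
      apply List.map_congr_left
      intro k _
      simp only [Function.comp]
      by_cases hkl : k = l
      · subst hkl; simp [hfilter]
      · rw [if_neg (by simpa using hkl)]
        rw [hfilter k, if_neg (fun h => hkl h.symm)]
        simp
    · -- new label : appended bucket
      have hgl : gVals zs l = [] := by
        unfold gVals
        rw [List.map_eq_nil_iff, List.filter_eq_nil_iff]
        intro q hq
        simp only [beq_iff_eq]
        intro hql
        apply hmem
        rw [hos, mem_foldl_gOrd]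
        exact Or.inr (List.mem_map.mpr ⟨q, hq, hql⟩)
      have hcon : D.contains l = false := by rw [hcontains]; simpa using hmem
      rw [gStep, hcon]
      simp only [Bool.not_false, if_true]
      simp only [PySem.Dict.insert, hcon, Bool.false_eq_true, if_false]
      rw [hitems]
      show (os.map (fun k => (k, gVals zs k))) ++ [(l, [p])] = _
      unfold gGroup
      rw [horder]
      have hordl : gOrd os l = os ++ [l] := by simp [gOrd, hmem]
      rw [hordl, List.map_append]
      congr 1
      · apply List.map_congr_left
        intro k hk
        rw [hfilter k, if_neg (show l ≠ k from fun h => hmem (h ▸ hk))]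
        simp
      · simp [hfilter l, hgl]

theorem getOrderedPaths_py_eq (paths labels : List String) :
    getOrderedPaths_py paths labels = getOrderedPaths_py_alt paths labels := by
  show ((List.range paths.length).foldl
      (fun (op : PySem.Dict String (List String)) (i : Nat) =>
        if !op.contains ((PySem.List.pyGet? labels (i : Int)).getD "") then
          op.insert ((PySem.List.pyGet? labels (i : Int)).getD "")
            [(PySem.List.pyGet? paths (i : Int)).getD ""]
        else
          op.insert ((PySem.List.pyGet? labels (i : Int)).getD "")
            (op.getD ((PySem.List.pyGet? labels (i : Int)).getD "") []
              ++ [(PySem.List.pyGet? paths (i : Int)).getD ""]))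
      PySem.Dict.empty).items
    = ((List.range paths.length).foldl
        (fun (acc : List String) (i : Nat) =>
          if ((PySem.List.pyGet? labels (i : Int)).getD "") ∈ acc then acc
          else acc ++ [(PySem.List.pyGet? labels (i : Int)).getD ""]) []).map
        (fun label =>
          (label,
            ((List.range paths.length).filter
              (fun (j : Nat) => ((PySem.List.pyGet? labels (j : Int)).getD "") == label)).map
              (fun (j : Nat) => ((PySem.List.pyGet? paths (j : Int)).getD ""))))
  set zs : List (String × String) := (List.range paths.length).map
    (fun (i : Nat) => ((PySem.List.pyGet? labels (i : Int)).getD "",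
               (PySem.List.pyGet? paths (i : Int)).getD "")) with hzs
  have hA : (List.range paths.length).foldl
      (fun (op : PySem.Dict String (List String)) (i : Nat) =>
        if !op.contains ((PySem.List.pyGet? labels (i : Int)).getD "") then
          op.insert ((PySem.List.pyGet? labels (i : Int)).getD "")
            [(PySem.List.pyGet? paths (i : Int)).getD ""]
        else
          op.insert ((PySem.List.pyGet? labels (i : Int)).getD "")
            (op.getD ((PySem.List.pyGet? labels (i : Int)).getD "") []
              ++ [(PySem.List.pyGet? paths (i : Int)).getD ""]))
      PySem.Dict.empty
      = zs.foldl gStep PySem.Dict.empty := by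
    rw [hzs, List.foldl_map]
    rfl
  have hOrd : (List.range paths.length).foldl
      (fun (acc : List String) (i : Nat) =>
        if ((PySem.List.pyGet? labels (i : Int)).getD "") ∈ acc then acc
        else acc ++ [(PySem.List.pyGet? labels (i : Int)).getD ""]) []
      = (zs.map Prod.fst).foldl gOrd [] := by
    rw [hzs, List.map_map, List.foldl_map]
    rfl
  have hB : ∀ l : String,
      ((List.range paths.length).filter
        (fun (j : Nat) => ((PySem.List.pyGet? labels (j : Int)).getD "") == l)).map
        (fun (j : Nat) => ((PySem.List.pyGet? paths (j : Int)).getD ""))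
      = gVals zs l := by
    intro l
    unfold gVals
    rw [hzs, List.filter_map, List.map_map]
    rfl
  rw [hA, foldl_gStep_items, hOrd]
  unfold gGroup
  apply List.map_congr_left
  intro l _
  rw [hB l]

-- ===== VERDICT (by name: the statement is the Claim_ definition above) =====
theorem getOrderedPaths_py_spec : Claim_equal_getOrderedPaths_py := by
  intro paths labels _ _
  exact getOrderedPaths_py_eq paths labels
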